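-- pv_equiv track=rewrite | github.com/LogicalFish/DiscordBot | python/commands/modules/diceroll.py | combine_dice
-- ===== SOURCE A (Python) =====
-- import operator
--
-- def combine_dice(dice_pairs):
--     """
--     A method that sorts a list of dice-pairs and adds dice with the same amount of faces in the same notation.
--     EXAMPLE: 1d20 + 1d8 + 1d12 + 1d20 => 2d20 + 1d12 + 1d8
--     :param dice_pairs: A list of tuples, each tuple having a length of two and representing dice notation.
--     :return: The input, sorted and compressed.
--     """
--     result = dice_pairs
--     result.sort(key=operator.itemgetter(1), reverse=True)
--     i = 0
--     while i+1 < len(result):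
--         if result[i+1][1] == result[i][1] and result[i+1][0]*result[i][0] > 0:
--             combination = (result[i+1][0]+result[i][0], result[i][1])
--             result.pop(i)
--             result.pop(i)
--             result.insert(i, combination)
--             i -= 1
--         i += 1
--     return result
-- ===== SOURCE B (Python) =====
-- def combine_dice(dice_pairs):
--     """Sort once (stable, by faces descending), then one linear pass merging
--     each item into the last output entry when faces match and signs agree."""
--     out = []
--     for item in sorted(dice_pairs, key=lambda p: p[1], reverse=True):
--         if out and item[1] == out[-1][1] and item[0] * out[-1][0] > 0:
--             out[-1] = (item[0] + out[-1][0], item[1])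
--         else:
--             out.append(item)
--     return out
-- ===== Notes on version B (the rewrite author's own statement) =====
-- stated objective: alternative
-- what changed: A merges with an index-stepping while-loop that pops two entries and re-inserts the combination in place; B sorts once and does a single forward pass that folds each item into the last output entry, never mutating mid-list.
import Mathlib
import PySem

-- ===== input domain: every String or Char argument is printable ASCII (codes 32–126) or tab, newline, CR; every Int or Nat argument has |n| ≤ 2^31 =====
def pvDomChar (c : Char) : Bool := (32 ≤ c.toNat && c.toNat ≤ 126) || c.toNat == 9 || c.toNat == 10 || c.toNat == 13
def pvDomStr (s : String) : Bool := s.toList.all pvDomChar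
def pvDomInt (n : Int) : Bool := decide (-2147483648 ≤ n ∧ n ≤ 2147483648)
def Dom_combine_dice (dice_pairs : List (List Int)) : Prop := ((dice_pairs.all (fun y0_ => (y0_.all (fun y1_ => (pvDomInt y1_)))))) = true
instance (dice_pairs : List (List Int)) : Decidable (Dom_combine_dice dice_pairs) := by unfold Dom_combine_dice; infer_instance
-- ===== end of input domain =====

-- B replaces A's in-place pop/insert while-loop by sort-once + one linear merging pass (same result, different structure).
-- A sorts its argument in place (and pops/inserts into it); the equivalence proved here is about the return value only.

-- ===== PORT A =====
-- result.pop(i) : keep the remaining list (the popped element is discarded by A)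
def popAt (xs : List (List Int)) (i : Nat) : List (List Int) :=
  ((PySem.List.pop? xs (i : Int)).map Prod.snd).getD xs

theorem popAt_length (xs : List (List Int)) (i : Nat) (h : i < xs.length) :
    (popAt xs i).length = xs.length - 1 := by
  simp [popAt, PySem.List.pop?_natCast xs i h, List.length_eraseIdx_of_lt h]

-- the while-loop of A: i advances, or the pair at (i, i+1) is merged in place
def combineLoopA (result : List (List Int)) (i : Nat) : List (List Int) :=
  if h : i + 1 < result.length then
    let a := PySem.List.pyGetD result (i : Int) []
    let b := PySem.List.pyGetD result ((i : Int) + 1) []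
    if PySem.List.pyGetD b 1 0 = PySem.List.pyGetD a 1 0 ∧
       PySem.List.pyGetD b 0 0 * PySem.List.pyGetD a 0 0 > 0 then
      -- pop(i); pop(i); insert(i, combination); i -= 1; i += 1  (net: same i, one element fewer)
      combineLoopA
        (PySem.List.insert (popAt (popAt result i) i) (i : Int)
          [PySem.List.pyGetD b 0 0 + PySem.List.pyGetD a 0 0, PySem.List.pyGetD a 1 0]) i
    else combineLoopA result (i + 1)
  else result
termination_by result.length - i
decreasing_by
  · have h1 : (popAt result i).length = result.length - 1 := popAt_length _ _ (by omega)
    have h2 : (popAt (popAt result i) i).length = (popAt result i).length - 1 :=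
      popAt_length _ _ (by omega)
    have h3 := PySem.List.length_insert (popAt (popAt result i) i) (i : Int)
      [PySem.List.pyGetD (PySem.List.pyGetD result ((i : Int) + 1) []) 0 0 +
         PySem.List.pyGetD (PySem.List.pyGetD result (i : Int) []) 0 0,
       PySem.List.pyGetD (PySem.List.pyGetD result (i : Int) []) 1 0]
    omega
  · omega

def combine_dice (dice_pairs : List (List Int)) : List (List Int) :=
  combineLoopA (PySem.List.sorted dice_pairs (fun p => PySem.List.pyGetD p 1 0) true) 0

-- ===== PORT B =====
-- one step of B's pass: merge item into the last output entry, or append it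
def stepB (out : List (List Int)) (item : List Int) : List (List Int) :=
  match out.getLast? with
  | some last =>
    if PySem.List.pyGetD item 1 0 = PySem.List.pyGetD last 1 0 ∧
       PySem.List.pyGetD item 0 0 * PySem.List.pyGetD last 0 0 > 0 then
      out.dropLast ++ [[PySem.List.pyGetD item 0 0 + PySem.List.pyGetD last 0 0,
                        PySem.List.pyGetD item 1 0]]
    else out ++ [item]
  | none => out ++ [item]

def combine_dice_alt (dice_pairs : List (List Int)) : List (List Int) :=
  (PySem.List.sorted dice_pairs (fun p => PySem.List.pyGetD p 1 0) true).foldl stepB []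

-- ===== PRECONDITION & SPEC =====
-- Pre_ excludes exactly the inputs on which A raises IndexError: some inner list shorter than 2.
def Pre_combine_dice (dice_pairs : List (List Int)) : Prop :=
  ∀ p ∈ dice_pairs, 2 ≤ p.length
instance (dice_pairs : List (List Int)) : Decidable (Pre_combine_dice dice_pairs) := by
  unfold Pre_combine_dice; infer_instance
def pvWitness_combine_dice : List (List Int) := [[1, 20], [1, 8], [1, 12], [1, 20]]

def Spec_combine_dice (dice_pairs : List (List Int)) (out : List (List Int)) : Prop := out = combine_dice_alt dice_pairs
instance (dice_pairs : List (List Int)) (out : List (List Int)) : Decidable (Spec_combine_dice dice_pairs out) := by unfold Spec_combine_dice; infer_instance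

-- ===== CLAIM (what is proved, stated in full; the proofs are below) =====
def Claim_equal_combine_dice : Prop := ∀ (dice_pairs : List (List Int)), Dom_combine_dice dice_pairs → Pre_combine_dice dice_pairs → Spec_combine_dice dice_pairs (combine_dice dice_pairs)

-- ===== LEMMAS AND PROOFS =====

-- the common characterisation: repeatedly merge the first mergeable adjacent pair, left to right
def mergeAdj : List (List Int) → List (List Int)
  | [] => []
  | [x] => [x]
  | x :: y :: rest =>
    if PySem.List.pyGetD y 1 0 = PySem.List.pyGetD x 1 0 ∧
       PySem.List.pyGetD y 0 0 * PySem.List.pyGetD x 0 0 > 0 then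
      mergeAdj ([PySem.List.pyGetD y 0 0 + PySem.List.pyGetD x 0 0,
                 PySem.List.pyGetD x 1 0] :: rest)
    else x :: mergeAdj (y :: rest)
termination_by l => l.length
decreasing_by all_goals simp

theorem eraseIdx_append_cons (pre t : List (List Int)) (x : List Int) :
    (pre ++ x :: t).eraseIdx pre.length = pre ++ t := by
  induction pre with
  | nil => rfl
  | cons p ps ih => simpa using ih

theorem insert_append (pre t : List (List Int)) (v : List Int) :
    PySem.List.insert (pre ++ t) (pre.length : Int) v = pre ++ v :: t := by
  rw [PySem.List.insert_natCast (pre ++ t) pre.length v (by simp)]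
  simp

theorem popAt_append_cons (pre t : List (List Int)) (x : List Int) :
    popAt (pre ++ x :: t) pre.length = pre ++ t := by
  rw [popAt, PySem.List.pop?_natCast _ _ (by simp)]
  simp [eraseIdx_append_cons]

theorem pyGetD_append_cons (pre t : List (List Int)) (x : List Int) :
    PySem.List.pyGetD (pre ++ x :: t) (pre.length : Int) [] = x := by
  simp [PySem.List.pyGetD_natCast]

-- A's loop, started just past an already-finished prefix, computes mergeAdj of the rest
theorem combineLoopA_eq (n : Nat) :
    ∀ (xs pre : List (List Int)), xs.length = n →
      combineLoopA (pre ++ xs) pre.length = pre ++ mergeAdj xs := by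
  induction n with
  | zero =>
    intro xs pre hl
    have : xs = [] := List.length_eq_zero_iff.mp hl
    subst this
    rw [combineLoopA]
    simp [mergeAdj]
  | succ n ih =>
    intro xs pre hl
    match xs with
    | [x] =>
      rw [combineLoopA]
      simp [mergeAdj]
    | x :: y :: rest =>
      have hx : PySem.List.pyGetD (pre ++ x :: y :: rest) (pre.length : Int) [] = x :=
        pyGetD_append_cons pre (y :: rest) x
      have hy : PySem.List.pyGetD (pre ++ x :: y :: rest) ((pre.length : Int) + 1) [] = y := by
        have : ((pre.length : Int) + 1) = (((pre ++ [x]).length : Nat) : Int) := by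
          simp
        rw [this]
        have := pyGetD_append_cons (pre ++ [x]) rest y
        simpa using this
      rw [combineLoopA]
      have hguard : pre.length + 1 < (pre ++ x :: y :: rest).length := by simp
      rw [dif_pos hguard]
      simp only [hx, hy]
      split_ifs with hc
      · -- merge branch
        have hp1 : popAt (pre ++ x :: y :: rest) pre.length = pre ++ y :: rest :=
          popAt_append_cons pre (y :: rest) x
        have hp2 : popAt (pre ++ y :: rest) pre.length = pre ++ rest :=
          popAt_append_cons pre rest y
        rw [hp1, hp2, insert_append]
        rw [ih ([PySem.List.pyGetD y 0 0 + PySem.List.pyGetD x 0 0,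
                 PySem.List.pyGetD x 1 0] :: rest) pre (by simp at hl ⊢; omega)]
        rw [mergeAdj, if_pos hc]
      · -- no-merge branch: advance i past x
        have hrw : pre ++ x :: y :: rest = (pre ++ [x]) ++ y :: rest := by simp
        have hlen : pre.length + 1 = (pre ++ [x]).length := by simp
        rw [hrw, hlen, ih (y :: rest) (pre ++ [x]) (by simp at hl ⊢; omega)]
        rw [mergeAdj, if_neg hc]
        simp

-- B's fold computes mergeAdj of the remaining input, given the output so far ends in x
theorem foldlB_eq (xs : List (List Int)) :
    ∀ (acc : List (List Int)) (x : List Int),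
      (xs.foldl stepB (acc ++ [x])) = acc ++ mergeAdj (x :: xs) := by
  induction xs with
  | nil => intro acc x; simp [mergeAdj]
  | cons y rest ih =>
    intro acc x
    rw [List.foldl_cons]
    rw [mergeAdj]
    have hstep : stepB (acc ++ [x]) y =
        if PySem.List.pyGetD y 1 0 = PySem.List.pyGetD x 1 0 ∧
           PySem.List.pyGetD y 0 0 * PySem.List.pyGetD x 0 0 > 0 then
          acc ++ [[PySem.List.pyGetD y 0 0 + PySem.List.pyGetD x 0 0,
                   PySem.List.pyGetD y 1 0]]
        else (acc ++ [x]) ++ [y] := by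
      rw [stepB]
      simp
    rw [hstep]
    split_ifs with hc
    · have hface : PySem.List.pyGetD y 1 0 = PySem.List.pyGetD x 1 0 := hc.1
      rw [ih acc _]
      rw [hface]
    · rw [ih (acc ++ [x]) y]
      simp

theorem mergeAdj_eq_foldlB (xs : List (List Int)) :
    xs.foldl stepB [] = mergeAdj xs := by
  match xs with
  | [] => simp [mergeAdj]
  | x :: rest =>
    rw [List.foldl_cons]
    have h0 : stepB [] x = ([] : List (List Int)) ++ [x] := by rw [stepB]; rfl
    rw [h0, foldlB_eq rest [] x]
    rfl

-- ===== VERDICT (by name: the statement is the Claim_ definition above) =====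
theorem combine_dice_spec : Claim_equal_combine_dice := by
  intro dice_pairs _ _
  unfold Spec_combine_dice combine_dice combine_dice_alt
  rw [mergeAdj_eq_foldlB]
  have := combineLoopA_eq
    (PySem.List.sorted dice_pairs (fun p => PySem.List.pyGetD p 1 0) true).length
    (PySem.List.sorted dice_pairs (fun p => PySem.List.pyGetD p 1 0) true) [] rfl
  simpa using this
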